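-- pv_equiv track=rewrite | github.com/zac112/adventOfCode | code2019/py3/day18/p1.py | findLocs
-- ===== SOURCE A (Python) =====
-- def findLocs(maze):
--     result = {}
--     #for c in "qwertyuiopasdfghjklzxcvbnmQWERTYUIOPASDFGHJKLZXCVBNM@":
--     for c in "qwertyuiopasdfghjklzxcvbnm@":
--         for y,row in enumerate(maze):
--             for x,char in enumerate(row):
--                 if char == c:
--                     result[c] = (y,x)
--     return result
-- ===== SOURCE B (Python) =====
-- KEYS = "qwertyuiopasdfghjklzxcvbnm@"
--
-- def findLocs(maze):
--     last = {}
--     for y, row in enumerate(maze):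
--         for x, char in enumerate(row):
--             if char in KEYS:
--                 last[char] = (y, x)
--     return {c: last[c] for c in KEYS if c in last}
-- ===== Notes on version B (the rewrite author's own statement) =====
-- stated objective: faster
-- what changed: B scans the maze once recording the last position of every key character in a dict, then emits the keys in the fixed key-string order, instead of A's 27 full-grid scans (one per key character).
import Mathlib
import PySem

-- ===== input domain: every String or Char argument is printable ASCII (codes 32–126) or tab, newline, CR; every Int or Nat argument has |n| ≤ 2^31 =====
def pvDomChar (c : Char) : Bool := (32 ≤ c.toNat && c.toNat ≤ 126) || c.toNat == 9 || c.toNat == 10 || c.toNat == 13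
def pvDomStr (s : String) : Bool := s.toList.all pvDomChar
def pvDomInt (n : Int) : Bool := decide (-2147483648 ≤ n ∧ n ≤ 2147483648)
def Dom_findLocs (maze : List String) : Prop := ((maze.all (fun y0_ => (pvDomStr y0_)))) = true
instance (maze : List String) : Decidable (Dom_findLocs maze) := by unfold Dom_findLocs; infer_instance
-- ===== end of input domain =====

-- B replaces A's 27 full-grid scans (one per key character) with ONE grid scan
-- recording last positions in a dict, then emits keys in the fixed key-string order.

-- the key characters, in A's scan order
def pvKeys : List Char := "qwertyuiopasdfghjklzxcvbnm@".toList

-- ===== PORT A =====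
def findLocs (maze : List String) : List (String × Int × Int) :=
  (pvKeys.foldl (fun result c =>
    (PySem.List.enumerate maze).foldl (fun result yrow =>
      (PySem.List.enumerate yrow.2.toList).foldl (fun result xchar =>
        if xchar.2 == c then result.insert (String.ofList [c]) (yrow.1, xchar.1) else result)
        result)
      result)
    PySem.Dict.empty).items

-- ===== PORT B =====
def findLocs_alt (maze : List String) : List (String × Int × Int) :=
  let last : PySem.Dict String (Int × Int) :=
    (PySem.List.enumerate maze).foldl (fun d yrow =>
      (PySem.List.enumerate yrow.2.toList).foldl (fun d xchar =>
        if pvKeys.contains xchar.2 then d.insert (String.ofList [xchar.2]) (yrow.1, xchar.1) else d)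
        d)
      PySem.Dict.empty
  (pvKeys.foldl (fun r c =>
    match last.get? (String.ofList [c]) with
    | some v => r.insert (String.ofList [c]) v
    | none => r)
    PySem.Dict.empty).items

-- ===== PRECONDITION & SPEC =====
def Spec_findLocs (maze : List String) (out : List (String × Int × Int)) : Prop := out = findLocs_alt maze
instance (maze : List String) (out : List (String × Int × Int)) : Decidable (Spec_findLocs maze out) := by unfold Spec_findLocs; infer_instance

-- ===== CLAIM (what is proved, stated in full; the proofs are below) =====
def Claim_equal_findLocs : Prop := ∀ (maze : List String), Dom_findLocs maze → Spec_findLocs maze (findLocs maze)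

-- ===== LEMMAS AND PROOFS =====

-- row-major list of (char, (y, x)) cells of the maze
def pvCells (maze : List String) : List (Char × Int × Int) :=
  (PySem.List.enumerate maze).flatMap (fun yrow =>
    (PySem.List.enumerate yrow.2.toList).map (fun xchar => (xchar.2, yrow.1, xchar.1)))

-- last recorded position of character c, row-major
def pvLast (c : Char) (maze : List String) : Option (Int × Int) :=
  (((pvCells maze).filter (fun t => t.1 == c)).map (fun t => t.2)).getLast?

-- the canonical dict both programs compute
def pvCanon (maze : List String) : PySem.Dict String (Int × Int) :=
  pvKeys.foldl (fun r c =>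
    match pvLast c maze with
    | some v => r.insert (String.ofList [c]) v
    | none => r)
    PySem.Dict.empty

theorem pv_nested_foldl {σ : Type} (rows : List (Int × String)) (g : σ → Char × Int × Int → σ)
    (st : σ) :
    rows.foldl (fun st yrow =>
      (PySem.List.enumerate yrow.2.toList).foldl (fun st xchar => g st (xchar.2, yrow.1, xchar.1)) st) st
    = (rows.flatMap (fun yrow =>
        (PySem.List.enumerate yrow.2.toList).map (fun xchar => (xchar.2, yrow.1, xchar.1)))).foldl g st := by
  induction rows generalizing st with
  | nil => rfl
  | cons r rs ih => simp [List.foldl_append, List.foldl_map, ih]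

theorem pv_fold_insert_const (l : List (Char × Int × Int))
    (d : PySem.Dict String (Int × Int)) (k : String) :
    l.foldl (fun d t => d.insert k t.2) d
    = match (l.map (fun t => t.2)).getLast? with | some v => d.insert k v | none => d := by
  induction l generalizing d with
  | nil => rfl
  | cons t l ih =>
    simp only [List.foldl_cons, ih, List.map_cons, List.getLast?_cons]
    cases h : (l.map (fun t => t.2)).getLast? with
    | none => simp
    | some w => simp [PySem.Dict.insert_insert_self]

theorem pv_get?_fold_insert (l : List (Char × Int × Int))
    (d : PySem.Dict String (Int × Int)) (c : Char) :
    (l.foldl (fun d t => d.insert (String.ofList [t.1]) t.2) d).get? (String.ofList [c])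
    = match ((l.filter (fun t => t.1 == c)).map (fun t => t.2)).getLast? with
      | some v => some v
      | none => d.get? (String.ofList [c]) := by
  induction l generalizing d with
  | nil => rfl
  | cons t l ih =>
    simp only [List.foldl_cons, ih]
    by_cases h : t.1 = c
    · subst h
      rw [List.filter_cons_of_pos (by simp)]
      cases hl : ((l.filter (fun t' => t'.1 == t.1)).map (fun t' => t'.2)).getLast? with
      | none =>
        simp only [List.map_cons, List.getLast?_cons, hl]
        simp [PySem.Dict.get?_insert_self]
      | some w =>
        simp only [List.map_cons, List.getLast?_cons, hl]
        simp
    · have hne : String.ofList [c] ≠ String.ofList [t.1] := by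
        intro he
        apply h
        have := congrArg String.toList he
        simpa using this.symm
      rw [List.filter_cons_of_neg (by simpa using h)]
      cases ((l.filter (fun t' => t'.1 == c)).map (fun t' => t'.2)).getLast? with
      | none => exact PySem.Dict.get?_insert_of_ne _ _ hne
      | some w => rfl

theorem pv_A_eq_canon (maze : List String) : findLocs maze = (pvCanon maze).items := by
  unfold findLocs pvCanon
  congr 1
  apply PySem.List.foldl_congr_mem
  intro acc c _
  rw [pv_nested_foldl (g := fun (st : PySem.Dict String (Int × Int)) t =>
        if t.1 == c then st.insert (String.ofList [c]) t.2 else st)]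
  rw [PySem.List.foldl_if_eq_foldl_filter]
  rw [pv_fold_insert_const]
  unfold pvLast pvCells
  rfl

theorem pv_B_eq_canon (maze : List String) : findLocs_alt maze = (pvCanon maze).items := by
  simp only [findLocs_alt, pvCanon]
  congr 1
  apply PySem.List.foldl_congr_mem
  intro acc c hc
  rw [pv_nested_foldl (g := fun (d : PySem.Dict String (Int × Int)) t =>
        if pvKeys.contains t.1 then d.insert (String.ofList [t.1]) t.2 else d)]
  rw [PySem.List.foldl_if_eq_foldl_filter, ← pvCells]
  rw [pv_get?_fold_insert]
  have hfil : ((pvCells maze).filter (fun t => pvKeys.contains t.1)).filter (fun t => t.1 == c)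
      = (pvCells maze).filter (fun t => t.1 == c) := by
    rw [List.filter_filter]
    apply List.filter_congr
    intro t _
    by_cases h : t.1 = c
    · subst h
      simp [hc]
    · simp [h]
  rw [hfil]
  unfold pvLast
  cases (((pvCells maze).filter (fun t => t.1 == c)).map (fun t => t.2)).getLast? <;>
    simp [PySem.Dict.get?_empty]

-- ===== VERDICT (by name: the statement is the Claim_ definition above) =====
theorem findLocs_spec : Claim_equal_findLocs := by
  intro maze _
  unfold Spec_findLocs
  rw [pv_A_eq_canon, pv_B_eq_canon]
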